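-- pv_equiv track=rewrite | github.com/BreezeDawn/- | Base/Day06/Exercises/习题5.py | creat_list
-- ===== SOURCE A (Python) =====
-- def creat_list(num,li='odd' ):
--     even_list =[]
--     odd_list = []
--     for i in range(num+1):
--         if i % 2 == 0:
--             even_list.append(i)
--         else:
--             odd_list.append(i)
--     if li == 'even':
--         return even_list
--     else:
--         return odd_list
-- ===== SOURCE B (Python) =====
-- def creat_list(num, li='odd'):
--     # Build exactly the requested parity sequence with a stepped range;
--     # no per-element parity test and no unused second list.
--     if li == 'even':
--         return list(range(0, num + 1, 2))
--     return list(range(1, num + 1, 2))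
-- ===== Notes on version B (the rewrite author's own statement) =====
-- stated objective: simpler
-- what changed: Replaces the single pass that tests each i's parity and fills two buckets (one discarded) by branching first on li and emitting the needed sequence directly as a step-2 range.
import Mathlib
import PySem

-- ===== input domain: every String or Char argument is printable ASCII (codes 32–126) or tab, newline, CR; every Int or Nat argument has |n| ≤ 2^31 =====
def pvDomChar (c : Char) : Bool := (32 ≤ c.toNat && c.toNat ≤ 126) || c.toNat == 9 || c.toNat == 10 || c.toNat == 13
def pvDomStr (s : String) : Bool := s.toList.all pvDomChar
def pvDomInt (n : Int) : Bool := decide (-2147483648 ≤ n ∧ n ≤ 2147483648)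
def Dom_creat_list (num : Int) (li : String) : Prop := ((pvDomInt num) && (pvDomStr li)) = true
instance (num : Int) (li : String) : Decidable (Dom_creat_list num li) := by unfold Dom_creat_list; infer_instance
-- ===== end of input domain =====

-- B drops A's two-bucket parity-testing pass and emits the requested sequence directly as a step-2 range (simpler; same O(n)).

-- ===== PORT A =====
def creat_list (num : Int) (li : String) : List Int :=
  let p := (PySem.List.pyRange 0 (num + 1) 1).foldl
    (fun (p : List Int × List Int) i =>
      if PySem.Int.mod i 2 = 0 then (p.1 ++ [i], p.2) else (p.1, p.2 ++ [i]))
    ([], [])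
  if li = "even" then p.1 else p.2

-- ===== PORT B =====
def creat_list_alt (num : Int) (li : String) : List Int :=
  if li = "even" then PySem.List.pyRange 0 (num + 1) 2
  else PySem.List.pyRange 1 (num + 1) 2

-- ===== PRECONDITION & SPEC =====
def Spec_creat_list (num : Int) (li : String) (out : List Int) : Prop := out = creat_list_alt num li
instance (num : Int) (li : String) (out : List Int) : Decidable (Spec_creat_list num li out) := by unfold Spec_creat_list; infer_instance

-- ===== CLAIM (what is proved, stated in full; the proofs are below) =====
def Claim_equal_creat_list : Prop := ∀ (num : Int) (li : String), Dom_creat_list num li → Spec_creat_list num li (creat_list num li)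

-- ===== LEMMAS AND PROOFS =====

-- Appending the next integer to a positive-step-2 range: b joins iff 2 ∣ b - a.
theorem pyRange_two_succ (a b : Int) (hab : a ≤ b + 1) :
    PySem.List.pyRange a (b + 1) 2 =
      PySem.List.pyRange a b 2 ++ (if (2 : Int) ∣ b - a then [b] else []) := by
  rw [PySem.List.pyRange_of_pos a (b + 1) (by norm_num),
      PySem.List.pyRange_of_pos a b (by norm_num)]
  by_cases hd : (2 : Int) ∣ b - a
  · rw [if_pos hd]
    rcases lt_or_eq_of_le hab with h1 | h1
    · have hlt : a < b + 1 := h1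
      by_cases h0 : a < b
      · rw [if_pos hlt, if_pos h0]
        have hN : ((b + 1 - a + 2 - 1) / 2).toNat = ((b - a + 2 - 1) / 2).toNat + 1 := by
          omega
        rw [hN, List.range_succ, List.map_append]
        congr 1
        simp only [List.map_cons, List.map_nil]
        congr 1
        omega
      · -- a = b (since a ≤ b via a < b+1 and ¬ a < b means a = b)
        have hab' : a = b := by omega
        subst hab'
        rw [if_pos hlt, if_neg h0]
        have hN : ((a + 1 - a + 2 - 1) / 2).toNat = 1 := by omega
        rw [hN]
        simp
    · -- a = b + 1 : both ranges empty and 2 ∤ -1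
      exfalso
      omega
  · rw [if_neg hd]
    by_cases h0 : a < b
    · have hlt : a < b + 1 := by omega
      rw [if_pos hlt, if_pos h0]
      have hN : ((b + 1 - a + 2 - 1) / 2).toNat = ((b - a + 2 - 1) / 2).toNat := by
        omega
      rw [hN, List.append_nil]
    · by_cases h1 : a < b + 1
      · -- a = b, but then 2 ∣ b - a = 0, contradiction
        exfalso
        have : a = b := by omega
        omega
      · rw [if_neg h1, if_neg h0, List.append_nil]

theorem fmod_two_cast (m : Nat) : PySem.Int.mod (m : Int) 2 = (m : Int) % 2 := by
  show Int.fmod (m : Int) 2 = (m : Int) % 2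
  rw [Int.fmod_eq_emod]
  simp

-- Loop invariant for A's fold: it appends exactly the even / odd step-2 ranges.
theorem foldA (m : Nat) (e o : List Int) :
    (PySem.List.pyRange 0 (m : Int) 1).foldl
      (fun (p : List Int × List Int) i =>
        if PySem.Int.mod i 2 = 0 then (p.1 ++ [i], p.2) else (p.1, p.2 ++ [i]))
      (e, o)
    = (e ++ PySem.List.pyRange 0 (m : Int) 2, o ++ PySem.List.pyRange 1 (m : Int) 2) := by
  induction m generalizing e o with
  | zero =>
      simp only [Nat.cast_zero]
      rw [PySem.List.pyRange_one_eq_nil (by norm_num)]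
      rw [PySem.List.pyRange_of_pos 0 0 (by norm_num), PySem.List.pyRange_of_pos 1 0 (by norm_num)]
      simp
  | succ k ih =>
      have hcast : ((k + 1 : Nat) : Int) = (k : Int) + 1 := by push_cast; ring
      rw [hcast, PySem.List.pyRange_one_succ_right (by positivity), List.foldl_append, ih]
      simp only [List.foldl_cons, List.foldl_nil]
      rw [pyRange_two_succ 0 (k : Int) (by omega), pyRange_two_succ 1 (k : Int) (by omega)]
      rw [fmod_two_cast]
      by_cases hk : (k : Int) % 2 = 0
      · rw [if_pos hk, if_pos (by omega : (2 : Int) ∣ (k : Int) - 0),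
            if_neg (by omega : ¬ (2 : Int) ∣ (k : Int) - 1)]
        simp
      · rw [if_neg hk, if_neg (by omega : ¬ (2 : Int) ∣ (k : Int) - 0),
            if_pos (by omega : (2 : Int) ∣ (k : Int) - 1)]
        simp

-- ===== VERDICT (by name: the statement is the Claim_ definition above) =====
theorem creat_list_spec : Claim_equal_creat_list := by
  intro num li _
  unfold Spec_creat_list creat_list creat_list_alt
  by_cases hn : num + 1 ≤ 0
  · rw [PySem.List.pyRange_one_eq_nil hn,
        PySem.List.pyRange_of_pos 0 (num + 1) (by norm_num),
        PySem.List.pyRange_of_pos 1 (num + 1) (by norm_num)]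
    rw [if_neg (by omega : ¬ (0 : Int) < num + 1), if_neg (by omega : ¬ (1 : Int) < num + 1)]
    simp
  · obtain ⟨m, hm⟩ : ∃ m : Nat, num + 1 = (m : Int) :=
      ⟨(num + 1).toNat, by omega⟩
    rw [hm, foldA m [] []]
    simp
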